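-- pv_equiv track=rewrite | github.com/arifulkhan/flight_scanner | server.py | guess_city_from_airport_name
-- ===== SOURCE A (Python) =====
-- def guess_city_from_airport_name(name):
--     text = str(name or "").strip()
--     if not text:
--         return ""
--     suffixes = (
--         " International Airport",
--         " Regional Airport",
--         " Municipal Airport",
--         " Airport",
--     )
--     for suffix in suffixes:
--         if text.endswith(suffix):
--             return text[: -len(suffix)].strip()
--     return text
-- ===== SOURCE B (Python) =====
-- def guess_city_from_airport_name(name):
--     text = str(name or "").strip()
--     if not text.endswith(" Airport"):
--         return text
--     base = text[: -len(" Airport")]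
--     for q in (" International", " Regional", " Municipal"):
--         if base.endswith(q):
--             base = base[: -len(q)]
--             break
--     return base.strip()
-- ===== Notes on version B (the rewrite author's own statement) =====
-- stated objective: idiomatic
-- what changed: Instead of scanning four precomposed suffixes longest-first, B peels the shared airport suffix once and then strips at most one optional qualifier (International/Regional/Municipal) from the remainder, factoring the suffix table and removing the longest-first ordering concern.
import Mathlib
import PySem

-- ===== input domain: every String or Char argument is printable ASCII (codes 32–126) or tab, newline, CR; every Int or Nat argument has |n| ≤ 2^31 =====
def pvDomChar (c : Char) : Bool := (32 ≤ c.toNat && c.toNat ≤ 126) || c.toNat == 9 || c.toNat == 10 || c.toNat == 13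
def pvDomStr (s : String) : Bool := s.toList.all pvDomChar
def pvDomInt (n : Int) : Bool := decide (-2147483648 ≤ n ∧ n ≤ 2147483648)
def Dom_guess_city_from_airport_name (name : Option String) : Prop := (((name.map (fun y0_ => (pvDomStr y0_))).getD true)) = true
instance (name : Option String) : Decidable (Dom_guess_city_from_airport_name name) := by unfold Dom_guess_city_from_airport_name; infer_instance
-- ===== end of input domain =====

-- B peels the shared airport suffix once and then at most one qualifier, instead of A's longest-first scan over four precomposed suffixes; same return values everywhere (objective: idiomatic).

-- ===== PORT A =====
-- the `for suffix in suffixes:` loop of A: first matching suffix wins, else fall through to `return text`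
def pvALoop (text : List Char) : List (List Char) → String
  | [] => String.ofList text
  | suf :: rest =>
    if PySem.Chars.endswith text suf then
      String.ofList (PySem.Chars.strip (PySem.List.slice text none (some (-(suf.length : Int)))))
    else pvALoop text rest

def guess_city_from_airport_name (name : Option String) : String :=
  -- `str(name or "")`: None and "" are both falsy and give ""
  let text := PySem.Chars.strip ((name.getD "").toList)
  if text = [] then ""
  else pvALoop text
    [" International Airport".toList, " Regional Airport".toList,
     " Municipal Airport".toList, " Airport".toList]

-- ===== PORT B =====
-- the `for q in (…): if base.endswith(q): base = base[:-len(q)]; break` loop of B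
def pvQualLoop (base : List Char) : List (List Char) → List Char
  | [] => base
  | q :: rest =>
    if PySem.Chars.endswith base q then
      PySem.List.slice base none (some (-(q.length : Int)))
    else pvQualLoop base rest

def guess_city_from_airport_name_alt (name : Option String) : String :=
  let text := PySem.Chars.strip ((name.getD "").toList)
  if PySem.Chars.endswith text " Airport".toList then
    String.ofList (PySem.Chars.strip
      (pvQualLoop (PySem.List.slice text none (some (-((" Airport".toList).length : Int))))
        [" International".toList, " Regional".toList, " Municipal".toList]))
  else String.ofList text

-- ===== PRECONDITION & SPEC =====
def Spec_guess_city_from_airport_name (name : Option String) (out : String) : Prop := out = guess_city_from_airport_name_alt name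
instance (name : Option String) (out : String) : Decidable (Spec_guess_city_from_airport_name name out) := by unfold Spec_guess_city_from_airport_name; infer_instance

-- ===== CLAIM (what is proved, stated in full; the proofs are below) =====
def Claim_equal_guess_city_from_airport_name : Prop := ∀ (name : Option String), Dom_guess_city_from_airport_name name → Spec_guess_city_from_airport_name name (guess_city_from_airport_name name)

-- ===== LEMMAS AND PROOFS =====

-- a composite suffix a++b is a suffix of s iff b is, and a is a suffix of what remains after b is removed
lemma pv_append_suffix_iff (a b s : List Char) :
    (a ++ b) <:+ s ↔ b <:+ s ∧ a <:+ s.take (s.length - b.length) := by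
  constructor
  · rintro ⟨u, rfl⟩
    refine ⟨⟨u ++ a, by simp⟩, ?_⟩
    have h : u ++ (a ++ b) = (u ++ a) ++ b := by simp
    rw [h]
    have hl : ((u ++ a) ++ b).length - b.length = (u ++ a).length := by
      simp; omega
    rw [hl, List.take_left]
    exact ⟨u, rfl⟩
  · rintro ⟨⟨v, rfl⟩, ha⟩
    have hl : (v ++ b).length - b.length = v.length := by simp
    rw [hl, List.take_left] at ha
    obtain ⟨w, rfl⟩ := ha
    exact ⟨w, by simp⟩

set_option maxHeartbeats 1000000 in
lemma pv_main (t : List Char) :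
    (if t = [] then "" else pvALoop t
      [" International Airport".toList, " Regional Airport".toList,
       " Municipal Airport".toList, " Airport".toList]) =
    (if PySem.Chars.endswith t " Airport".toList then
      String.ofList (PySem.Chars.strip
        (pvQualLoop (PySem.List.slice t none (some (-((" Airport".toList).length : Int))))
          [" International".toList, " Regional".toList, " Municipal".toList]))
     else String.ofList t) := by
  by_cases h0 : t = []
  · rw [h0]; decide
  rw [if_neg h0]
  have dI : " International Airport".toList = " International".toList ++ " Airport".toList := rfl
  have dR : " Regional Airport".toList = " Regional".toList ++ " Airport".toList := rfl
  have dM : " Municipal Airport".toList = " Municipal".toList ++ " Airport".toList := rfl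
  have lA : (" Airport".toList).length = 8 := rfl
  by_cases h8 : " Airport".toList <:+ t
  · simp only [pvALoop, pvQualLoop]
    rw [PySem.List.slice_to_neg_natCast t (" International Airport".toList.length) (by decide),
        PySem.List.slice_to_neg_natCast t (" Regional Airport".toList.length) (by decide),
        PySem.List.slice_to_neg_natCast t (" Municipal Airport".toList.length) (by decide),
        PySem.List.slice_to_neg_natCast t (" Airport".toList.length) (by decide),
        PySem.List.slice_to_neg_natCast _ (" International".toList.length) (by decide),
        PySem.List.slice_to_neg_natCast _ (" Regional".toList.length) (by decide),
        PySem.List.slice_to_neg_natCast _ (" Municipal".toList.length) (by decide)]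
    simp only [PySem.Chars.endswith_iff, dI, dR, dM, pv_append_suffix_iff, lA]
    simp only [h8, true_and]
    by_cases hI : " International".toList <:+ t.take (t.length - 8) <;>
      by_cases hR : " Regional".toList <:+ t.take (t.length - 8) <;>
        by_cases hM : " Municipal".toList <:+ t.take (t.length - 8) <;>
          simp only [hI, hR, hM, if_pos, if_neg, not_false_iff] <;>
            first
            | rfl
            | (congr 2; simp [List.take_take, List.length_take]; omega)
  · simp only [pvALoop]
    simp only [PySem.Chars.endswith_iff, dI, dR, dM, pv_append_suffix_iff, lA]
    simp only [h8, false_and, if_false]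

-- ===== VERDICT (by name: the statement is the Claim_ definition above) =====
theorem guess_city_from_airport_name_spec : Claim_equal_guess_city_from_airport_name := by
  intro name _
  unfold Spec_guess_city_from_airport_name guess_city_from_airport_name guess_city_from_airport_name_alt
  exact pv_main (PySem.Chars.strip ((name.getD "").toList))
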